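-- pv_equiv track=rewrite | github.com/XintingXu/master-degree-code | 5-Calculation-FFT/feature.py | generate_sample_list
-- ===== SOURCE A (Python) =====
-- def generate_sample_list(max_seq: int, drop_list: list):
--     result = list()
--     for seq in range(1, max_seq + 1):
--         if seq in drop_list:
--             result.append(1)
--         else:
--             result.append(0)
--     return result
-- ===== SOURCE B (Python) =====
-- def generate_sample_list(max_seq: int, drop_list: list):
--     result = [0] * max_seq
--     for d in drop_list:
--         if 1 <= d <= max_seq:
--             result[d - 1] = 1
--     return result
-- ===== Notes on version B (the rewrite author's own statement) =====
-- stated objective: faster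
-- what changed: B pre-allocates a zero list and scatters a 1 at index d-1 for each in-range drop value, instead of A's per-position membership scan over drop_list.
import Mathlib
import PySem

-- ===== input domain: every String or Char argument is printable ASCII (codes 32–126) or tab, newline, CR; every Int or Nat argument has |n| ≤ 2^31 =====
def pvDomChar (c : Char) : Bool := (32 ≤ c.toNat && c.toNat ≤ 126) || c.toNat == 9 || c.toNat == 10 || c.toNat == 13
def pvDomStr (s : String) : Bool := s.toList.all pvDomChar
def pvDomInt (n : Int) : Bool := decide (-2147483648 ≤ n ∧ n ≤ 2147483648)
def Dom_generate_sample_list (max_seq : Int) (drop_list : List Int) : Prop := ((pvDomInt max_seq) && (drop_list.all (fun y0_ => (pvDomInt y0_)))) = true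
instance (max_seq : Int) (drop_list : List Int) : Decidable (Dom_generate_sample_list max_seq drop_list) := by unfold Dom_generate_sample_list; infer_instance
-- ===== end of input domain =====

-- B replaces A's per-position membership scan with a pre-zeroed list and a single scatter pass over drop_list (faster).


-- ===== PORT A =====
def generate_sample_list (max_seq : Int) (drop_list : List Int) : List Int :=
  (PySem.List.pyRange 1 (max_seq + 1) 1).foldl
    (fun result seq => if seq ∈ drop_list then result ++ [1] else result ++ [0]) []

-- ===== PORT B =====
-- the body of B's for-loop: mark cell d-1 when d is in range, else leave result unchanged
def scatterStep (max_seq : Int) (result : List Int) (d : Int) : List Int :=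
  if 1 ≤ d ∧ d ≤ max_seq then PySem.List.pySetD result (d - 1) 1 else result

def generate_sample_list_alt (max_seq : Int) (drop_list : List Int) : List Int :=
  drop_list.foldl (scatterStep max_seq) (List.replicate max_seq.toNat 0)

-- ===== PRECONDITION & SPEC =====
def Spec_generate_sample_list (max_seq : Int) (drop_list : List Int) (out : List Int) : Prop := out = generate_sample_list_alt max_seq drop_list
instance (max_seq : Int) (drop_list : List Int) (out : List Int) : Decidable (Spec_generate_sample_list max_seq drop_list out) := by unfold Spec_generate_sample_list; infer_instance

-- ===== CLAIM (what is proved, stated in full; the proofs are below) =====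
def Claim_equal_generate_sample_list : Prop := ∀ (max_seq : Int) (drop_list : List Int), Dom_generate_sample_list max_seq drop_list → Spec_generate_sample_list max_seq drop_list (generate_sample_list max_seq drop_list)

-- ===== LEMMAS AND PROOFS =====

-- A's loop is a map over the range: position k (0-based) holds 1 iff 1+k is in drop_list.
theorem portA_eq_map (max_seq : Int) (drop_list : List Int) :
    generate_sample_list max_seq drop_list =
      (List.range max_seq.toNat).map (fun (k : Nat) => if (1 + (k : Int)) ∈ drop_list then (1 : Int) else 0) := by
  unfold generate_sample_list
  have h : (fun (result : List Int) (seq : Int) =>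
      if seq ∈ drop_list then result ++ [1] else result ++ [0]) =
      (fun result seq => result ++ [if seq ∈ drop_list then (1 : Int) else 0]) := by
    funext r s; by_cases hs : s ∈ drop_list <;> simp [hs]
  rw [h, PySem.List.foldl_append_singleton_eq_map, PySem.List.pyRange_one]
  have h2 : max_seq + 1 - 1 = max_seq := by ring
  simp only [List.nil_append, List.map_map, h2]
  rfl

-- B's scatter loop preserves the accumulator's length.
theorem lenB (max_seq : Int) : ∀ (ds : List Int) (acc : List Int),
    (ds.foldl (scatterStep max_seq) acc).length = acc.length := by
  intro ds
  induction ds with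
  | nil => intro acc; simp
  | cons d ds ih =>
    intro acc
    simp only [List.foldl_cons]
    rw [ih]
    unfold scatterStep
    by_cases hd : 1 ≤ d ∧ d ≤ max_seq <;> simp [hd, PySem.List.length_pySetD]

-- B's scatter loop, characterised entrywise: cell i ends as 1 iff i+1 is an in-range drop value.
theorem getB (max_seq : Int) : ∀ (ds : List Int) (acc : List Int) (i : Nat), i < acc.length →
    (ds.foldl (scatterStep max_seq) acc)[i]? =
      if ((i : Int) + 1) ∈ ds ∧ (i : Int) + 1 ≤ max_seq then some 1 else acc[i]? := by
  intro ds
  induction ds with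
  | nil => intro acc i _; simp
  | cons d ds ih =>
    intro acc i hi
    simp only [List.foldl_cons]
    unfold scatterStep at ih ⊢
    by_cases hd : 1 ≤ d ∧ d ≤ max_seq
    · rw [if_pos hd,
        show PySem.List.pySetD acc (d - 1) 1 = acc.set (d - 1).toNat 1 from
          PySem.List.pySetD_of_nonneg acc (i := d - 1) 1 (by omega)]
      rw [ih _ i (by simpa using hi)]
      by_cases hmem : ((i : Int) + 1) ∈ ds ∧ (i : Int) + 1 ≤ max_seq
      · rw [if_pos hmem, if_pos ⟨List.mem_cons_of_mem d hmem.1, hmem.2⟩]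
      · rw [if_neg hmem]
        by_cases hde : d = (i : Int) + 1
        · have hidx : (d - 1).toNat = i := by omega
          have : ((i : Int) + 1) ∈ d :: ds ∧ (i : Int) + 1 ≤ max_seq := by
            exact ⟨by simp [hde], by omega⟩
          rw [if_pos this, hidx, List.getElem?_set_self hi]
        · have hidx : (d - 1).toNat ≠ i := by omega
          rw [List.getElem?_set_ne hidx]
          by_cases hmem' : ((i : Int) + 1) ∈ d :: ds ∧ (i : Int) + 1 ≤ max_seq
          · exfalso
            rcases List.mem_cons.mp hmem'.1 with h | h
            · exact hde h.symm
            · exact hmem ⟨h, hmem'.2⟩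
          · rw [if_neg hmem']
    · rw [if_neg hd, ih _ i hi]
      by_cases hde : d = (i : Int) + 1
      · have : ¬ (((i : Int) + 1) ∈ ds ∧ (i : Int) + 1 ≤ max_seq) := by
          intro h; exact hd ⟨by omega, by omega⟩
        rw [if_neg this]
        have : ¬ (((i : Int) + 1) ∈ d :: ds ∧ (i : Int) + 1 ≤ max_seq) := by
          intro h; exact hd ⟨by omega, by omega⟩
        rw [if_neg this]
      · by_cases hmem : ((i : Int) + 1) ∈ ds ∧ (i : Int) + 1 ≤ max_seq
        · rw [if_pos hmem, if_pos ⟨List.mem_cons_of_mem d hmem.1, hmem.2⟩]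
        · rw [if_neg hmem]
          have : ¬ (((i : Int) + 1) ∈ d :: ds ∧ (i : Int) + 1 ≤ max_seq) := by
            intro h
            rcases List.mem_cons.mp h.1 with h' | h'
            · exact hde h'.symm
            · exact hmem ⟨h', h.2⟩
          rw [if_neg this]

-- ===== VERDICT (by name: the statement is the Claim_ definition above) =====
theorem generate_sample_list_spec : Claim_equal_generate_sample_list := by
  intro max_seq drop_list _
  unfold Spec_generate_sample_list
  rw [portA_eq_map]
  unfold generate_sample_list_alt
  apply List.ext_getElem?
  intro i
  by_cases hi : i < max_seq.toNat
  · rw [getB max_seq drop_list _ i (by simpa using hi)]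
    have hle : (i : Int) + 1 ≤ max_seq := by omega
    rw [List.getElem?_map, List.getElem?_range hi]
    by_cases hmem : ((i : Int) + 1) ∈ drop_list
    · rw [if_pos ⟨hmem, hle⟩]
      simp [add_comm 1 (i : Int), hmem]
    · rw [if_neg (by intro h; exact hmem h.1)]
      simp [add_comm 1 (i : Int), hmem, hi]
  · have hlen := lenB max_seq drop_list (List.replicate max_seq.toNat 0)
    have h2 : (drop_list.foldl (scatterStep max_seq) (List.replicate max_seq.toNat 0))[i]? = none := by
      apply List.getElem?_eq_none
      rw [hlen, List.length_replicate]
      omega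
    rw [h2]
    apply List.getElem?_eq_none
    simpa using hi
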